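-- pv_equiv track=rewrite | github.com/cisco-ai-defense/a2a-scanner | a2ascanner/cli/cli.py | parse_analyzer_list
-- ===== SOURCE A (Python) =====
-- def parse_analyzer_list(values: list[str] | None) -> list[str] | None:
--     """Flatten comma-separated and repeated --analyzers values."""
--     if not values:
--         return None
--     out: list[str] = []
--     for raw in values:
--         for part in raw.split(","):
--             p = part.strip()
--             if p:
--                 out.append(p)
--     return out or None
-- ===== SOURCE B (Python) =====
-- def parse_analyzer_list(values: list[str] | None) -> list[str] | None:
--     """Flatten comma-separated and repeated --analyzers values.
--
--     Character-level scanner: one pass per string over its characters with an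
--     explicit token buffer; a comma (or end of string) flushes the buffer,
--     trimming whitespace from both ends by hand. No split()/strip() calls.
--     """
--     if not values:
--         return None
--     out: list[str] = []
--     for raw in values:
--         buf = ""
--         for ch in raw + ",":
--             if ch == ",":
--                 while buf and buf[0].isspace():
--                     buf = buf[1:]
--                 while buf and buf[-1].isspace():
--                     buf = buf[:-1]
--                 if buf:
--                     out.append(buf)
--                 buf = ""
--             else:
--                 buf += ch
--     return out or None
-- ===== Notes on version B (the rewrite author's own statement) =====
-- stated objective: alternative
-- what changed: Replaces split(',')/strip() calls with a character-level state machine: one scan over each string's characters with an explicit token buffer that is flushed on each comma (and at end of string), trimming whitespace from both ends by hand before appending.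
import Mathlib
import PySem

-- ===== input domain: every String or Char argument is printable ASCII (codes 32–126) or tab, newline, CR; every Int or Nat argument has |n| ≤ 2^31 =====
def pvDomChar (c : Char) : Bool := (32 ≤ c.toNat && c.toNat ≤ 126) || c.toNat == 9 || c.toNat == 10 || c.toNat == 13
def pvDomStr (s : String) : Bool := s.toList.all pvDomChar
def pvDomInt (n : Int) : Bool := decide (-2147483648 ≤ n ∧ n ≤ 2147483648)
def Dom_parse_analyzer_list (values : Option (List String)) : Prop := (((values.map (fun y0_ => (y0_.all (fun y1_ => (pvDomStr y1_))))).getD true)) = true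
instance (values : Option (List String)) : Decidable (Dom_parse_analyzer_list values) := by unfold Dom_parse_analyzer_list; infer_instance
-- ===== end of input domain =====

-- B replaces split(',')/strip() with a character-level state machine: one scan over each
-- string's characters with an explicit token buffer flushed at each comma (alternative).

-- ===== PORT A =====
def parse_analyzer_list (values : Option (List String)) : Option (List String) :=
  match values with
  | none => none
  | some vs =>
    if vs = [] then none
    else
      let out := vs.foldl (fun out raw =>
        ((PySem.Chars.splitOn raw.toList [',']).map String.ofList).foldl
          (fun out part =>
            let p := PySem.Str.strip part
            if p ≠ "" then out ++ [p] else out) out) []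
      if out = [] then none else some out

-- ===== PORT B =====
-- while buf and buf[0].isspace(): buf = buf[1:]
def trimFront : List Char → List Char
  | [] => []
  | c :: rest => if PySem.Chars.isspace c then trimFront rest else c :: rest

-- while buf and buf[-1].isspace(): buf = buf[:-1]
def trimBack (l : List Char) : List Char :=
  if h : l ≠ [] then
    if PySem.Chars.isspace (l.getLast h) then trimBack l.dropLast else l
  else l
termination_by l.length
decreasing_by
  cases l with
  | nil => exact absurd rfl h
  | cons a as =>
    have : (a :: as).dropLast.length = as.length := by simp
    rw [this, List.length_cons]
    omega

-- the per-character step of B's scanner: state = (out, buf)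
def scanStep (st : List String × List Char) (ch : Char) : List String × List Char :=
  if ch = ',' then
    let buf := trimBack (trimFront st.2)
    (if buf ≠ [] then st.1 ++ [String.ofList buf] else st.1, [])
  else (st.1, st.2 ++ [ch])

def parse_analyzer_list_alt (values : Option (List String)) : Option (List String) :=
  match values with
  | none => none
  | some vs =>
    if vs = [] then none
    else
      let out := vs.foldl (fun out raw =>
        ((raw.toList ++ [',']).foldl scanStep (out, [])).1) []
      if out = [] then none else some out

-- ===== PRECONDITION & SPEC =====
def Spec_parse_analyzer_list (values : Option (List String)) (out : Option (List String)) : Prop := out = parse_analyzer_list_alt values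
instance (values : Option (List String)) (out : Option (List String)) : Decidable (Spec_parse_analyzer_list values out) := by unfold Spec_parse_analyzer_list; infer_instance

-- ===== CLAIM (what is proved, stated in full; the proofs are below) =====
def Claim_equal_parse_analyzer_list : Prop := ∀ (values : Option (List String)), Dom_parse_analyzer_list values → Spec_parse_analyzer_list values (parse_analyzer_list values)

-- ===== LEMMAS AND PROOFS =====

-- clean model of splitting on a single comma
def split1 : List Char → List (List Char)
  | [] => [[]]
  | c :: rest => if c = ',' then [] :: split1 rest else (split1 rest).modifyHead (c :: ·)

theorem split1_ne_nil (l : List Char) : split1 l ≠ [] := by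
  induction l with
  | nil => simp [split1]
  | cons c rest ih =>
    simp only [split1]
    split
    · simp
    · cases h : split1 rest with
      | nil => exact absurd h ih
      | cons x xs => simp [List.modifyHead]

theorem splitOn_go_eq (l : List Char) : ∀ (fuel : Nat), l.length < fuel →
    ∀ (cur : List Char) (acc : List (List Char)),
    PySem.Chars.splitOn.go [','] fuel l cur acc
      = acc.reverse ++ (split1 l).modifyHead (cur.reverse ++ ·) := by
  induction l with
  | nil =>
    intro fuel hf cur acc
    match fuel, hf with
    | fuel + 1, _ => simp [PySem.Chars.splitOn.go, split1]
  | cons c rest ih =>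
    intro fuel hf cur acc
    match fuel, hf with
    | fuel + 1, hf =>
      by_cases hc : c = ','
      · subst hc
        have hpre : List.isPrefixOf [','] (',' :: rest) = true := by
          simp [List.isPrefixOf]
        rw [PySem.Chars.splitOn.go]
        simp only [hpre, if_true, List.length_cons, List.length_nil,
          List.drop_succ_cons, List.drop_zero]
        rw [ih fuel (by simpa using hf) [] (cur.reverse :: acc)]
        cases h : split1 rest with
        | nil => exact absurd h (split1_ne_nil rest)
        | cons x xs => simp [split1, List.modifyHead, h]
      · have hpre : List.isPrefixOf [','] (c :: rest) = false := by
          simp [List.isPrefixOf]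
          exact fun h => hc h.symm
        rw [PySem.Chars.splitOn.go]
        simp only [hpre, Bool.false_eq_true, if_false]
        rw [ih fuel (by simpa using hf) (c :: cur) acc]
        cases h : split1 rest with
        | nil => exact absurd h (split1_ne_nil rest)
        | cons x xs => simp [split1, hc, h, List.modifyHead]

theorem splitOn_eq_split1 (l : List Char) :
    PySem.Chars.splitOn l [','] = split1 l := by
  rw [PySem.Chars.splitOn, splitOn_go_eq l (l.length + 1) (by omega) [] []]
  cases h : split1 l with
  | nil => exact absurd h (split1_ne_nil l)
  | cons x xs => simp [List.modifyHead]

-- A's inner fold appends the stripped non-empty tokens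
theorem inner_foldl (g : List String → String → List String)
    (hg : ∀ out part, g out part
      = if PySem.Str.strip part = "" then out else out ++ [PySem.Str.strip part])
    (l : List String) : ∀ acc : List String,
    l.foldl g acc = acc ++ (l.map PySem.Str.strip).filter (fun p => p ≠ "") := by
  induction l with
  | nil => intro acc; simp
  | cons x xs ih =>
    intro acc
    rw [List.foldl_cons, hg, ih]
    by_cases h : PySem.Str.strip x = "" <;> simp [h]

-- the two trim loops compute lstrip / rstrip
theorem trimFront_eq (l : List Char) : trimFront l = PySem.Chars.lstrip l := by
  induction l with
  | nil => rfl
  | cons c rest ih =>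
    by_cases h : PySem.Chars.isspace c <;>
      simp [trimFront, PySem.Chars.lstrip, List.dropWhile, h, ih]

theorem trimBack_eq (l : List Char) : trimBack l = PySem.Chars.rstrip l := by
  induction l using List.reverseRecOn with
  | nil => simp [trimBack, PySem.Chars.rstrip]
  | append_singleton l' a ih =>
    rw [trimBack]
    rw [dif_pos (by simp : l' ++ [a] ≠ [])]
    simp only [List.getLast_concat, List.dropLast_concat]
    by_cases h : PySem.Chars.isspace a
    · rw [if_pos h, ih]
      simp [PySem.Chars.rstrip, h]
    · rw [if_neg h]
      simp [PySem.Chars.rstrip, h]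

theorem trim_eq_strip (l : List Char) :
    trimBack (trimFront l) = PySem.Chars.strip l := by
  rw [trimFront_eq, trimBack_eq, PySem.Chars.strip]

-- strings vs char lists for the token filter
theorem tokens_bridge (segs : List (List Char)) :
    ((segs.map String.ofList).map PySem.Str.strip).filter (fun p => p ≠ "")
      = ((segs.map PySem.Chars.strip).filter (fun s => s ≠ [])).map String.ofList := by
  induction segs with
  | nil => rfl
  | cons s rest ih =>
    have hs : PySem.Str.strip (String.ofList s) = String.ofList (PySem.Chars.strip s) := by
      apply String.ext
      simp [PySem.Str.toList_strip]
    simp only [List.map_cons, List.filter_cons, hs, ih]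
    by_cases h : PySem.Chars.strip s = []
    · simp [h]
    · have hne : String.ofList (PySem.Chars.strip s) ≠ "" := by
        intro hcon
        have := congrArg String.toList hcon
        simp at this
        exact h this
      simp [h, hne]

-- B's scanner over l ++ [','] flushes exactly the stripped non-empty segments of l,
-- the first segment prefixed by the pending buffer
theorem scan_eq (l : List Char) : ∀ (buf : List Char) (out : List String),
    ((l ++ [',']).foldl scanStep (out, buf)).1
      = out ++ ((((split1 l).modifyHead (buf ++ ·)).map PySem.Chars.strip).filter
          (fun s => s ≠ [])).map String.ofList := by
  induction l with
  | nil =>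
    intro buf out
    simp only [List.nil_append, List.foldl_cons, List.foldl_nil, scanStep,
      trim_eq_strip, split1, List.modifyHead, List.append_nil]
    by_cases h : PySem.Chars.strip buf = [] <;> simp [h]
  | cons c rest ih =>
    intro buf out
    by_cases hc : c = ','
    · subst hc
      have hstep : scanStep (out, buf) ',' =
          (if PySem.Chars.strip buf ≠ [] then out ++ [String.ofList (PySem.Chars.strip buf)]
           else out, []) := by
        simp [scanStep, trim_eq_strip]
      simp only [List.cons_append, List.foldl_cons, hstep]
      rw [ih [] _]
      have hmod : (split1 rest).modifyHead (fun x => [] ++ x) = split1 rest := by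
        cases split1 rest <;> simp [List.modifyHead]
      rw [hmod]
      simp only [split1, List.modifyHead]
      by_cases h : PySem.Chars.strip buf = [] <;> simp [h]
    · have hstep : scanStep (out, buf) c = (out, buf ++ [c]) := by
        simp [scanStep, hc]
      simp only [List.cons_append, List.foldl_cons, hstep]
      rw [ih (buf ++ [c]) out]
      have hmod : ((split1 rest).modifyHead (c :: ·)).modifyHead (buf ++ ·)
          = (split1 rest).modifyHead ((buf ++ [c]) ++ ·) := by
        cases split1 rest with
        | nil => rfl
        | cons x xs => simp [List.modifyHead]
      simp only [split1, hc, if_false, hmod]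

-- both outer folds append the same tokens per raw
theorem outer_eq (vs : List String) : ∀ out : List String,
    vs.foldl (fun out raw =>
      ((PySem.Chars.splitOn raw.toList [',']).map String.ofList).foldl
        (fun out part =>
          let p := PySem.Str.strip part
          if p ≠ "" then out ++ [p] else out) out) out
    = vs.foldl (fun out raw => ((raw.toList ++ [',']).foldl scanStep (out, [])).1) out := by
  induction vs with
  | nil => intro out; rfl
  | cons raw rest ih =>
    intro out
    simp only [List.foldl_cons]
    have hg : ∀ out part, (fun out part =>
          let p := PySem.Str.strip part
          if p ≠ "" then out ++ [p] else out) out part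
        = if PySem.Str.strip part = "" then out else out ++ [PySem.Str.strip part] := by
      intro out part
      by_cases h : PySem.Str.strip part = "" <;> simp [h]
    rw [inner_foldl _ hg, scan_eq, splitOn_eq_split1, tokens_bridge]
    have hmod : (split1 raw.toList).modifyHead (fun x => [] ++ x) = split1 raw.toList := by
      cases split1 raw.toList <;> simp [List.modifyHead]
    rw [hmod, ih]

-- ===== VERDICT (by name: the statement is the Claim_ definition above) =====
theorem parse_analyzer_list_spec : Claim_equal_parse_analyzer_list := by
  intro values _
  unfold Spec_parse_analyzer_list parse_analyzer_list parse_analyzer_list_alt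
  match values with
  | none => rfl
  | some vs =>
    by_cases h : vs = []
    · simp [h]
    · simp only [h, if_false]
      rw [outer_eq]
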